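-- pv_equiv track=rewrite | github.com/sophiaray/euler-offline | test_project-euler.py | divisible_thru_19
-- ===== SOURCE A (Python) =====
-- def divisible_thru_19(target):
--     divisible = True
--     d = 19
--     while divisible:
--         if target % d != 0:
--             divisible = False
--         if d == 3:
--             break
--         else:
--             d -= 1
--     return divisible
-- ===== SOURCE B (Python) =====
-- def divisible_thru_19(target):
--     # divisible by every d in 3..19  <=>  divisible by lcm(3..19) = 232792560
--     return target % 232792560 == 0
-- ===== Notes on version B (the rewrite author's own statement) =====
-- stated objective: simpler
-- what changed: Replaced the descending 19..3 trial-division loop by a single closed-form modulo against lcm(3..19) = 232792560.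
import Mathlib
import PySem

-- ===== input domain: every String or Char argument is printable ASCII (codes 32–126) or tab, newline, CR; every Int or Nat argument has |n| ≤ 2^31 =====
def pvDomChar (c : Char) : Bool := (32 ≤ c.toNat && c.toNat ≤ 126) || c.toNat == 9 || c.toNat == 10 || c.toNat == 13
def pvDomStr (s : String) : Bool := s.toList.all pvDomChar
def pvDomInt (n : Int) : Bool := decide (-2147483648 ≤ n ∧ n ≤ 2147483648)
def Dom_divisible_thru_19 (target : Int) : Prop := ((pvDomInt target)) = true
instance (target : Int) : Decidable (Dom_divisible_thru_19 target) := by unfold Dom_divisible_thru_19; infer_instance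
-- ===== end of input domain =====

-- B replaces A's descending 19..3 trial-division loop by one modulo against lcm(3..19) = 232792560; objective: simpler.

-- ===== PORT A =====
-- the while loop: state (divisible, d); fuel 17 covers d = 19 down to 3 (the loop breaks at d = 3 or exits when divisible is false)
def divLoopA (target : Int) : Nat → Bool → Int → Bool
  | 0, divisible, _ => divisible
  | Nat.succ fuel, divisible, d =>
    if divisible then
      let divisible' := if PySem.Int.mod target d ≠ 0 then false else divisible
      if d = 3 then divisible'
      else divLoopA target fuel divisible' (d - 1)
    else divisible

def divisible_thru_19 (target : Int) : Bool := divLoopA target 17 true 19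

-- ===== PORT B =====
def divisible_thru_19_alt (target : Int) : Bool := PySem.Int.mod target 232792560 == 0

-- ===== PRECONDITION & SPEC =====
def Spec_divisible_thru_19 (target : Int) (out : Bool) : Prop := out = divisible_thru_19_alt target
instance (target : Int) (out : Bool) : Decidable (Spec_divisible_thru_19 target out) := by unfold Spec_divisible_thru_19; infer_instance

-- ===== CLAIM (what is proved, stated in full; the proofs are below) =====
def Claim_equal_divisible_thru_19 : Prop := ∀ (target : Int), Dom_divisible_thru_19 target → Spec_divisible_thru_19 target (divisible_thru_19 target)

-- ===== LEMMAS AND PROOFS =====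

theorem divLoopA_false (t : Int) (n : Nat) (d : Int) : divLoopA t n false d = false := by
  cases n <;> simp [divLoopA]

theorem divLoopA_step (t : Int) (n : Nat) (d : Int) :
    divLoopA t (n + 1) true d =
      if PySem.Int.mod t d = 0 then (if d = 3 then true else divLoopA t n true (d - 1)) else false := by
  by_cases h : PySem.Int.mod t d = 0 <;> by_cases hd : d = 3 <;>
    simp [divLoopA, h, hd, divLoopA_false]

-- the loop starting at d = 3 + n with fuel n + 1 tests exactly the divisors 3 + k, k ≤ n
theorem divLoopA_char (t : Int) : ∀ n : Nat,
    divLoopA t (n + 1) true (3 + (n : Int)) = decide (∀ k : Nat, k ≤ n → (3 + (k : Int)) ∣ t) := by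
  intro n
  induction n with
  | zero =>
      rw [divLoopA_step]
      by_cases h : PySem.Int.mod t 3 = 0 <;> simp_all
  | succ n ih =>
      rw [divLoopA_step]
      have hne : (3 + ((n : Int) + 1)) ≠ 3 := by omega
      have hd1 : (3 + ((n : Int) + 1)) - 1 = 3 + (n : Int) := by ring
      push_cast
      push_cast at ih
      rw [if_neg hne, hd1, ih]
      by_cases h : PySem.Int.mod t (3 + ((n : Int) + 1)) = 0
      · rw [if_pos h, decide_eq_decide]
        rw [PySem.Int.mod_eq_zero_iff_dvd] at h
        constructor
        · intro hq k hk
          rcases Nat.lt_or_ge k (n + 1) with hlt | hge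
          · exact hq k (by omega)
          · have : k = n + 1 := by omega
            subst this; push_cast; exact h
        · intro hp k hk; exact hp k (by omega)
      · rw [if_neg h]
        rw [PySem.Int.mod_eq_zero_iff_dvd] at h
        symm; simp only [decide_eq_false_iff_not]
        intro hp
        exact h (by have := hp (n + 1) le_rfl; push_cast at this; exact this)

-- divisibility by every 3 + k, k ≤ 16, gives divisibility by lcm(3..19) = 16·9·5·7·11·13·17·19
theorem key_fwd (t : Int) (h : ∀ k : Nat, k ≤ 16 → (3 + (k : Int)) ∣ t) : (232792560 : Int) ∣ t := by
  have g : ∀ m : Nat, (m : Int) ∣ t → m ∣ t.natAbs := fun m hm =>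
    Int.natCast_dvd_natCast.mp (Int.dvd_natAbs.mpr hm)
  have e : ∀ k : Nat, k ≤ 16 → (3 + k) ∣ t.natAbs := by
    intro k hk
    refine g (3 + k) ?_
    have := h k hk; push_cast; exact_mod_cast this
  have h16 := e 13 (by norm_num)
  have h9 := e 6 (by norm_num)
  have h5 := e 2 (by norm_num)
  have h7 := e 4 (by norm_num)
  have h11 := e 8 (by norm_num)
  have h13 := e 10 (by norm_num)
  have h17 := e 14 (by norm_num)
  have h19 := e 16 (by norm_num)
  norm_num at h16 h9 h5 h7 h11 h13 h17 h19
  have c1 : (16 * 9 : ℕ) ∣ t.natAbs := Nat.Coprime.mul_dvd_of_dvd_of_dvd (by decide) h16 h9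
  have c2 : (16 * 9 * 5 : ℕ) ∣ t.natAbs := Nat.Coprime.mul_dvd_of_dvd_of_dvd (by decide) c1 h5
  have c3 : (16 * 9 * 5 * 7 : ℕ) ∣ t.natAbs := Nat.Coprime.mul_dvd_of_dvd_of_dvd (by decide) c2 h7
  have c4 : (16 * 9 * 5 * 7 * 11 : ℕ) ∣ t.natAbs := Nat.Coprime.mul_dvd_of_dvd_of_dvd (by decide) c3 h11
  have c5 : (16 * 9 * 5 * 7 * 11 * 13 : ℕ) ∣ t.natAbs := Nat.Coprime.mul_dvd_of_dvd_of_dvd (by decide) c4 h13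
  have c6 : (16 * 9 * 5 * 7 * 11 * 13 * 17 : ℕ) ∣ t.natAbs := Nat.Coprime.mul_dvd_of_dvd_of_dvd (by decide) c5 h17
  have c7 : (16 * 9 * 5 * 7 * 11 * 13 * 17 * 19 : ℕ) ∣ t.natAbs := Nat.Coprime.mul_dvd_of_dvd_of_dvd (by decide) c6 h19
  have : ((16 * 9 * 5 * 7 * 11 * 13 * 17 * 19 : ℕ) : ℤ) ∣ t :=
    Int.dvd_natAbs.mp (Int.natCast_dvd_natCast.mpr c7)
  norm_num at this
  exact this

theorem key_bwd (t : Int) (h : (232792560 : Int) ∣ t) : ∀ k : Nat, k ≤ 16 → (3 + (k : Int)) ∣ t := by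
  intro k hk
  interval_cases k <;> norm_num <;> exact dvd_trans (by norm_num) h

-- ===== VERDICT (by name: the statement is the Claim_ definition above) =====
theorem divisible_thru_19_spec : Claim_equal_divisible_thru_19 := by
  intro t _
  unfold Spec_divisible_thru_19 divisible_thru_19 divisible_thru_19_alt
  have hc : divLoopA t 17 true 19 = decide (∀ k : Nat, k ≤ 16 → (3 + (k : Int)) ∣ t) := by
    have := divLoopA_char t 16
    norm_num at this
    exact this
  rw [hc]
  have hm : (PySem.Int.mod t 232792560 == 0) = decide ((232792560 : Int) ∣ t) := by
    by_cases h : (232792560 : Int) ∣ t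
    · simp [h]
    · simp [h]
  rw [hm, decide_eq_decide]
  exact ⟨key_fwd t, key_bwd t⟩
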